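-- pv_equiv track=rewrite | github.com/tn82/advent-of-code | 2021/18.py | find_left_reg
-- ===== SOURCE A (Python) =====
-- def find_left_reg(s, end):
--     regs = '0123456789'
--     i = -1
--     for r in regs:
--         idx = s.rfind(r, 0, end)
--         if idx > i:
--             i = idx
--     return i
-- ===== SOURCE B (Python) =====
-- def find_left_reg(s, end):
--     sub = s[:end]
--     for i in range(len(sub) - 1, -1, -1):
--         if sub[i] in '0123456789':
--             return i
--     return -1
-- ===== Notes on version B (the rewrite author's own statement) =====
-- stated objective: simpler
-- what changed: Replaces ten per-digit rfind scans combined by a running max with a single backward scan over s[:end] that returns the first position holding any digit.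
import Mathlib
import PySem

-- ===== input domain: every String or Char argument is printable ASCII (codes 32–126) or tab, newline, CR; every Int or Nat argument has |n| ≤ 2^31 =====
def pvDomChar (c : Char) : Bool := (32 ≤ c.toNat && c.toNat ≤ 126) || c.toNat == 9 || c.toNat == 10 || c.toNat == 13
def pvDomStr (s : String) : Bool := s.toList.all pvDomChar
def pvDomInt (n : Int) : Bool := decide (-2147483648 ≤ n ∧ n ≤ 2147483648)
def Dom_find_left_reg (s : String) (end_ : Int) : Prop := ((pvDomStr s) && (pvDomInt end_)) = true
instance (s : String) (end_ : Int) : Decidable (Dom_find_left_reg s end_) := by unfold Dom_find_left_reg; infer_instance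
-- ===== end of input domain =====

-- B replaces ten per-digit rfind scans + running max by one backward scan over s[:end]
-- (simpler, one pass); return value only, no side effects.

-- ===== PORT A =====
-- for r in regs: idx = s.rfind(r, 0, end); if idx > i: i = idx
def find_left_reg (s : String) (end_ : Int) : Int :=
  let regs := "0123456789"
  regs.toList.foldl (fun i r =>
    let idx := PySem.Str.rfindFrom s (String.ofList [r]) 0 (some end_)
    if idx > i then idx else i) (-1)

-- ===== PORT B =====
-- for i in range(len(sub)-1, -1, -1): if sub[i] in '0123456789': return i
-- (the downward index loop; the `none` branch of the index lookup is unreachable since i < len sub)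
def pvScanBack (sub : List Char) : Nat → Int
  | 0 => -1
  | k+1 =>
    match sub[k]? with
    | some c => if ("0123456789".toList.contains c) then ((k : Nat) : Int) else pvScanBack sub k
    | none => pvScanBack sub k

def find_left_reg_alt (s : String) (end_ : Int) : Int :=
  let sub := (PySem.Str.slice s none (some end_)).toList
  pvScanBack sub sub.length

-- ===== PRECONDITION & SPEC =====
def Spec_find_left_reg (s : String) (end_ : Int) (out : Int) : Prop := out = find_left_reg_alt s end_
instance (s : String) (end_ : Int) (out : Int) : Decidable (Spec_find_left_reg s end_ out) := by unfold Spec_find_left_reg; infer_instance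

-- ===== CLAIM (what is proved, stated in full; the proofs are below) =====
def Claim_equal_find_left_reg : Prop := ∀ (s : String) (end_ : Int), Dom_find_left_reg s end_ → Spec_find_left_reg s end_ (find_left_reg s end_)

-- ===== LEMMAS AND PROOFS =====

-- definitional equations for PySem.Chars.rfind.go and pvScanBack
theorem pvGo_zero (sub : List Char) (c : Char) :
    PySem.Chars.rfind.go sub [c] 0 = if [c].isPrefixOf sub = true then 0 else -1 := rfl

theorem pvGo_succ (sub : List Char) (c : Char) (j : Nat) :
    PySem.Chars.rfind.go sub [c] (j+1) =
      if [c].isPrefixOf (sub.drop (j+1)) = true then ((j+1 : Nat) : Int)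
      else PySem.Chars.rfind.go sub [c] j := rfl

theorem pvScan_zero (sub : List Char) : pvScanBack sub 0 = -1 := rfl

theorem pvScan_succ (sub : List Char) (k : Nat) :
    pvScanBack sub (k+1) =
      match sub[k]? with
      | some c => if ("0123456789".toList.contains c) then ((k : Nat) : Int) else pvScanBack sub k
      | none => pvScanBack sub k := rfl

theorem pvScan_succ_none (sub : List Char) (k : Nat) (hg : sub[k]? = none) :
    pvScanBack sub (k+1) = pvScanBack sub k := by
  rw [pvScan_succ, hg]

theorem pvScan_succ_some (sub : List Char) (k : Nat) (c : Char) (hg : sub[k]? = some c) :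
    pvScanBack sub (k+1) =
      if ("0123456789".toList.contains c) then ((k : Nat) : Int) else pvScanBack sub k := by
  rw [pvScan_succ, hg]

-- [c] is a prefix of sub.drop j  iff  sub[j]? = some c
theorem pvSingPrefix (sub : List Char) (j : Nat) (c : Char) :
    [c].isPrefixOf (sub.drop j) = true ↔ sub[j]? = some c := by
  rw [List.isPrefixOf_iff_prefix, ← List.head?_drop]
  cases sub.drop j with
  | nil => simp
  | cons x t => simp [List.cons_prefix_cons, eq_comm]

-- lower/upper bounds and characterisation of PySem.Chars.rfind.go for a singleton needle
theorem pvGo_lb (sub : List Char) (c : Char) (k : Nat) :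
    -1 ≤ PySem.Chars.rfind.go sub [c] k := by
  induction k with
  | zero => rw [pvGo_zero]; split <;> omega
  | succ j ih => rw [pvGo_succ]; split <;> [omega; exact ih]

theorem pvGo_le (sub : List Char) (c : Char) (k : Nat) :
    PySem.Chars.rfind.go sub [c] k ≤ (k : Int) := by
  induction k with
  | zero => rw [pvGo_zero]; split <;> omega
  | succ j ih =>
    rw [pvGo_succ]; split
    · omega
    · exact le_trans ih (by omega)

theorem pvGo_mem (sub : List Char) (c : Char) (k : Nat)
    (h : 0 ≤ PySem.Chars.rfind.go sub [c] k) :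
    sub[(PySem.Chars.rfind.go sub [c] k).toNat]? = some c := by
  induction k with
  | zero =>
    rw [pvGo_zero] at h ⊢
    split at h
    · rename_i hp
      simp only [if_pos hp, Int.toNat_zero]
      exact (pvSingPrefix sub 0 c).1 (by simpa using hp)
    · omega
  | succ j ih =>
    rw [pvGo_succ] at h ⊢
    split at h
    · rename_i hp
      simp only [if_pos hp, Int.toNat_natCast]
      exact (pvSingPrefix sub (j+1) c).1 hp
    · rename_i hp
      simp only [if_neg hp]
      exact ih h

theorem pvGo_ge (sub : List Char) (c : Char) (k j : Nat)
    (hj : j ≤ k) (hc : sub[j]? = some c) :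
    (j : Int) ≤ PySem.Chars.rfind.go sub [c] k := by
  induction k with
  | zero =>
    interval_cases j
    have hp : [c].isPrefixOf sub = true := by
      simpa using (pvSingPrefix sub 0 c).2 (by simpa using hc)
    rw [pvGo_zero, if_pos hp]
    norm_num
  | succ m ih =>
    rw [pvGo_succ]
    split
    · rename_i hp
      have := pvGo_le sub c m
      omega
    · rename_i hp
      rcases Nat.lt_or_ge j (m+1) with h | h
      · exact ih (by omega)
      · exfalso; apply hp
        have : j = m + 1 := by omega
        subst this
        exact (pvSingPrefix sub (m+1) c).2 hc

-- bounds and characterisation of the backward scan pvScanBack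
theorem pvScan_lb (sub : List Char) (k : Nat) : -1 ≤ pvScanBack sub k := by
  induction k with
  | zero => rw [pvScan_zero]
  | succ j ih =>
    cases hg : sub[j]? with
    | none => rw [pvScan_succ_none sub j hg]; exact ih
    | some c =>
      rw [pvScan_succ_some sub j c hg]
      split
      · exact le_trans (by norm_num) (Int.natCast_nonneg j)
      · exact ih

theorem pvScan_le (sub : List Char) (k : Nat) : pvScanBack sub k < (k : Int) := by
  induction k with
  | zero => rw [pvScan_zero]; omega
  | succ j ih =>
    cases hg : sub[j]? with
    | none => rw [pvScan_succ_none sub j hg]; omega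
    | some c =>
      rw [pvScan_succ_some sub j c hg]
      split <;> omega

theorem pvScan_mem (sub : List Char) (k : Nat)
    (h : 0 ≤ pvScanBack sub k) :
    ∃ c, sub[(pvScanBack sub k).toNat]? = some c ∧
      ("0123456789".toList.contains c) = true := by
  induction k with
  | zero => rw [pvScan_zero] at h; omega
  | succ j ih =>
    cases hg : sub[j]? with
    | none => rw [pvScan_succ_none sub j hg] at h ⊢; exact ih h
    | some c =>
      rw [pvScan_succ_some sub j c hg] at h ⊢
      split at h
      · rename_i hd
        simp only [if_pos hd, Int.toNat_natCast]
        exact ⟨c, hg, hd⟩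
      · rename_i hd
        simp only [if_neg hd]
        exact ih h

theorem pvScan_ge (sub : List Char) (k j : Nat) (c : Char)
    (hj : j < k) (hc : sub[j]? = some c)
    (hd : ("0123456789".toList.contains c) = true) :
    (j : Int) ≤ pvScanBack sub k := by
  induction k with
  | zero => omega
  | succ m ih =>
    rcases Nat.lt_or_ge j m with h | h
    · have hrec := ih h
      cases hg : sub[m]? with
      | none => rw [pvScan_succ_none sub m hg]; exact hrec
      | some c' =>
        rw [pvScan_succ_some sub m c' hg]
        split
        · omega
        · exact hrec
    · have : j = m := by omega
      subst this
      rw [pvScan_succ_some sub j c hc, if_pos hd]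

-- fold-with-running-max lemmas for A's loop
theorem pvFold_ge_init (f : Char → Int) (L : List Char) (init : Int) :
    init ≤ L.foldl (fun i c => if f c > i then f c else i) init := by
  induction L generalizing init with
  | nil => simp
  | cons x t ih =>
    simp only [List.foldl_cons]
    refine le_trans ?_ (ih _)
    split <;> omega

theorem pvFold_ge_mem (f : Char → Int) (L : List Char) (init : Int) (c : Char)
    (hc : c ∈ L) :
    f c ≤ L.foldl (fun i c => if f c > i then f c else i) init := by
  induction L generalizing init with
  | nil => simp at hc
  | cons x t ih =>
    simp only [List.foldl_cons]
    rcases List.mem_cons.1 hc with h | h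
    · subst h
      refine le_trans ?_ (pvFold_ge_init f t _)
      split <;> omega
    · exact ih _ h

theorem pvFold_le (f : Char → Int) (L : List Char) (init m : Int)
    (h0 : init ≤ m) (hf : ∀ c ∈ L, f c ≤ m) :
    L.foldl (fun i c => if f c > i then f c else i) init ≤ m := by
  induction L generalizing init with
  | nil => simpa
  | cons x t ih =>
    simp only [List.foldl_cons]
    refine ih _ ?_ (fun c hc => hf c (List.mem_cons_of_mem _ hc))
    have := hf x (List.mem_cons_self ..)
    split <;> omega

-- rfind on a singleton needle is rfind.go at the full length (definitional)
theorem pvRfind_eq_go (s : List Char) (c : Char) :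
    PySem.Chars.rfind s [c] = PySem.Chars.rfind.go s [c] s.length := rfl

theorem pvRfind_lb (s : List Char) (c : Char) : -1 ≤ PySem.Chars.rfind s [c] := by
  rw [pvRfind_eq_go]; exact pvGo_lb s c s.length

-- rfindFrom with start 0 is rfind on the clamped prefix
theorem pvRfindFrom_zero (s : List Char) (c : Char) (e : Int) :
    PySem.Chars.rfindFrom s [c] 0 (some e) =
      PySem.Chars.rfind (s.take (PySem.List.clampIdx s.length e)) [c] := by
  have he : (if (s.length : Int) < e then ((s.length : Int))
        else if e < 0 then (if e + (s.length : Int) < 0 then 0 else e + (s.length : Int)) else e)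
      = ((PySem.List.clampIdx s.length e : Nat) : Int) := by
    simp only [PySem.List.clampIdx]
    split_ifs <;> omega
  simp only [PySem.Chars.rfindFrom]
  rw [he]
  norm_num
  have := pvRfind_lb (s.take (PySem.List.clampIdx s.length e)) c
  split_ifs <;> omega

-- the B-side slice is the same clamped prefix
theorem pvSlice_eq (s : List Char) (e : Int) :
    PySem.List.slice s none (some e) = s.take (PySem.List.clampIdx s.length e) := by
  simp [PySem.List.slice]

-- core: the max of the per-digit rfinds equals the backward scan
theorem pvCore (sub : List Char) :
    ("0123456789".toList).foldl
      (fun i c => if PySem.Chars.rfind sub [c] > i then PySem.Chars.rfind sub [c] else i) (-1)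
      = pvScanBack sub sub.length := by
  by_cases h : 0 ≤ pvScanBack sub sub.length
  · obtain ⟨c, hmem, hd⟩ := pvScan_mem sub sub.length h
    have hlt := pvScan_le sub sub.length
    have hidx : (pvScanBack sub sub.length).toNat < sub.length := by omega
    apply le_antisymm
    · apply pvFold_le _ _ _ _ (by omega)
      intro c' hc'
      by_cases h2 : 0 ≤ PySem.Chars.rfind sub [c']
      · have hm := pvGo_mem sub c' sub.length (by rw [← pvRfind_eq_go]; exact h2)
        rw [← pvRfind_eq_go] at hm
        have hi : (PySem.Chars.rfind sub [c']).toNat < sub.length :=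
          (List.getElem?_eq_some_iff.1 hm).1
        have := pvScan_ge sub sub.length (PySem.Chars.rfind sub [c']).toNat c' hi hm
          (by simpa using hc')
        omega
      · have := pvRfind_lb sub c'
        omega
    · have h1 := pvFold_ge_mem (fun c => PySem.Chars.rfind sub [c]) ("0123456789".toList)
        (-1) c (by simpa using hd)
      have h2 := pvGo_ge sub c sub.length (pvScanBack sub sub.length).toNat
        (by omega) hmem
      rw [← pvRfind_eq_go] at h2
      simp only [] at h1
      omega
  · have hB := pvScan_lb sub sub.length
    have hB' : pvScanBack sub sub.length = -1 := by omega
    rw [hB']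
    apply le_antisymm
    · apply pvFold_le _ _ _ _ (by omega)
      intro c' hc'
      by_cases h2 : 0 ≤ PySem.Chars.rfind sub [c']
      · exfalso
        have hm := pvGo_mem sub c' sub.length (by rw [← pvRfind_eq_go]; exact h2)
        rw [← pvRfind_eq_go] at hm
        have hi : (PySem.Chars.rfind sub [c']).toNat < sub.length :=
          (List.getElem?_eq_some_iff.1 hm).1
        have := pvScan_ge sub sub.length (PySem.Chars.rfind sub [c']).toNat c' hi hm
          (by simpa using hc')
        omega
      · have := pvRfind_lb sub c'
        omega
    · exact pvFold_ge_init _ _ _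

-- ===== VERDICT (by name: the statement is the Claim_ definition above) =====
theorem find_left_reg_spec : Claim_equal_find_left_reg := by
  intro s end_ _
  unfold Spec_find_left_reg find_left_reg find_left_reg_alt
  simp only [PySem.Str.rfindFrom_eq, PySem.Str.toList_slice, PySem.Chars.slice_eq_listSlice,
    pvSlice_eq]
  simp only [String.toList_ofList, pvRfindFrom_zero]
  exact pvCore _
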